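-- pv_equiv track=rewrite | github.com/halcyon-past/placement-training | 100 Leetcode POD/0197 FindScoreOfAnArrayAfterMarkingAllElements.py | findScore
-- ===== SOURCE A (Python) =====
-- from typing import List
-- from collections import deque
--
-- def findScore(nums: List[int]) -> int:
--     score = 0
--     n = len(nums)
--     q = deque()
--
--     # Traverse through the array
--     for i in range(n):
--         # If queue is not empty and the current number is greater than or equal to the last in queue
--         if q and nums[i] >= q[-1]:
--             skip = False
--             # Process the elements in the queue
--             while q:
--                 add = q.pop()
--                 if not skip:
--                     score += add
--                 skip = not skip
--             continue
--
--         # Add current element to the queue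
--         q.append(nums[i])
--
--     # Final processing of remaining elements in the queue
--     skip = False
--     while q:
--         add = q.pop()
--         if not skip:
--             score += add
--         skip = not skip
--
--     return score
-- ===== SOURCE B (Python) =====
-- from typing import List
--
-- def findScore(nums: List[int]) -> int:
--     # O(1) extra space: instead of storing the current strictly decreasing run,
--     # keep the two alternating sums of the run (s_add = what flushing would add now).
--     score = 0
--     s_add = 0
--     s_skip = 0
--     last = None
--     for v in nums:
--         if last is not None and v >= last:
--             score += s_add
--             s_add = 0
--             s_skip = 0
--             last = None
--         else:
--             s_add, s_skip = v + s_skip, s_add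
--             last = v
--     return score + s_add
-- ===== Notes on version B (the rewrite author's own statement) =====
-- stated objective: alternative
-- what changed: B drops A's deque of the current strictly decreasing run and its inner pop-alternating while loop, maintaining instead two running alternating sums and the last value, so flushing a run is one O(1) addition and the extra space is O(1).
import Mathlib
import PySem

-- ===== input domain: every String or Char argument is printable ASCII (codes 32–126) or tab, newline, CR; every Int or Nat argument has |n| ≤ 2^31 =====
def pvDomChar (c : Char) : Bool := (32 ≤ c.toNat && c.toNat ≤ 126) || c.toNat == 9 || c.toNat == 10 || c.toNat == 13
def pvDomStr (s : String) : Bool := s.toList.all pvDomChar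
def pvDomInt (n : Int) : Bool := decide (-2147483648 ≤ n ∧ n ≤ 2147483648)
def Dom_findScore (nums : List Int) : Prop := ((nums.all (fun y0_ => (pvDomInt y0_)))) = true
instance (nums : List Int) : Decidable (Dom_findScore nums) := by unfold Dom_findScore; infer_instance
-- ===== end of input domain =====

-- B replaces A's deque of the current decreasing run and its inner pop-alternating flush loop
-- by two running alternating sums kept in O(1) space (objective: alternative, O(1) extra space).

-- ===== PORT A =====
-- the 'while q: add = q.pop(); if not skip: score += add; skip = not skip' loop (pop = last element)
def pvFlush (q : List Int) (score : Int) (skip : Bool) : Int :=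
  match h : q with
  | [] => score
  | _ :: _ =>
    pvFlush q.dropLast (if skip then score else score + q.getLast (by simp [h])) (!skip)
termination_by q.length
decreasing_by simp [h]

def findScore (nums : List Int) : Int :=
  -- the for-loop over range(n) reads nums[i] in order: a fold over nums with state (score, q)
  let st := nums.foldl
    (fun (st : Int × List Int) v =>
      match hq : st.2 with
      | [] => (st.1, st.2 ++ [v])
      | _ :: _ =>
        if v ≥ st.2.getLast (by simp [hq]) then (pvFlush st.2 st.1 false, [])
        else (st.1, st.2 ++ [v]))
    (0, [])
  pvFlush st.2 st.1 false

-- ===== PORT B =====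
def findScore_alt (nums : List Int) : Int :=
  let st := nums.foldl
    (fun (st : Int × Int × Int × Option Int) v =>
      let (score, sAdd, sSkip, last) := st
      if (match last with | some l => decide (v ≥ l) | none => false) then
        (score + sAdd, 0, 0, none)
      else
        (score, v + sSkip, sAdd, some v))
    (0, 0, 0, none)
  st.1 + st.2.1

-- ===== PRECONDITION & SPEC =====
def Spec_findScore (nums : List Int) (out : Int) : Prop := out = findScore_alt nums
instance (nums : List Int) (out : Int) : Decidable (Spec_findScore nums out) := by unfold Spec_findScore; infer_instance

-- ===== CLAIM (what is proved, stated in full; the proofs are below) =====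
def Claim_equal_findScore : Prop := ∀ (nums : List Int), Dom_findScore nums → Spec_findScore nums (findScore nums)

-- ===== LEMMAS AND PROOFS =====

lemma pvFlush_nil (s : Int) (skip : Bool) : pvFlush [] s skip = s := by
  rw [pvFlush]

lemma pvFlush_append (q : List Int) (v s : Int) (skip : Bool) :
    pvFlush (q ++ [v]) s skip = pvFlush q (if skip then s else s + v) (!skip) := by
  rw [pvFlush.eq_def]
  split
  · rename_i h; simp at h
  · simp

lemma pvFlush_add (q : List Int) (s : Int) (skip : Bool) :
    pvFlush q s skip = s + pvFlush q 0 skip := by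
  induction q using List.reverseRecOn generalizing s skip with
  | nil => simp [pvFlush_nil]
  | append_singleton q v ih =>
    rw [pvFlush_append, pvFlush_append, ih, ih (if skip then 0 else 0 + v)]
    cases skip
    · simp
      ring
    · simp

-- the fold invariant: B's state (score, sAdd, sSkip, last) mirrors A's state (score, q)
lemma pv_loop_inv (nums : List Int) : ∀ (score : Int) (q : List Int),
    (let stB := nums.foldl
      (fun (st : Int × Int × Int × Option Int) v =>
        let (score, sAdd, sSkip, last) := st
        if (match last with | some l => decide (v ≥ l) | none => false) then
          (score + sAdd, 0, 0, none)
        else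
          (score, v + sSkip, sAdd, some v))
      (score, pvFlush q 0 false, pvFlush q 0 true, q.getLast?)
     stB.1 + stB.2.1)
    = (let stA := nums.foldl
        (fun (st : Int × List Int) v =>
          match hq : st.2 with
          | [] => (st.1, st.2 ++ [v])
          | _ :: _ =>
            if v ≥ st.2.getLast (by simp [hq]) then (pvFlush st.2 st.1 false, [])
            else (st.1, st.2 ++ [v]))
        (score, q)
       pvFlush stA.2 stA.1 false) := by
  induction nums with
  | nil =>
    intro score q
    simp only [List.foldl]
    exact (pvFlush_add q score false).symm
  | cons v rest ih =>
    intro score q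
    simp only [List.foldl]
    match hq : q with
    | [] =>
      have hv1 : pvFlush [v] 0 false = v := by
        simpa [pvFlush_nil] using pvFlush_append [] v 0 false
      have hv2 : pvFlush [v] 0 true = 0 := by
        simpa [pvFlush_nil] using pvFlush_append [] v 0 true
      have H := ih score [v]
      rw [hv1, hv2] at H
      simpa [pvFlush_nil] using H
    | a :: q' =>
      by_cases hv : v ≥ (a :: q').getLast (by simp)
      · have hB :
          (match ((a :: q').getLast?) with | some l => decide (v ≥ l) | none => false) = true := by
          rw [List.getLast?_eq_some_getLast (l := a :: q') (by simp)]
          simpa using hv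
        simp only [hB, hv, if_true]
        have H := ih (pvFlush (a :: q') score false) []
        simpa [pvFlush_nil, pvFlush_add (a :: q') score false] using H
      · have hB :
          (match ((a :: q').getLast?) with | some l => decide (v ≥ l) | none => false) = false := by
          rw [List.getLast?_eq_some_getLast (l := a :: q') (by simp)]
          simpa using hv
        simp only [hB, hv, if_false, Bool.false_eq_true]
        have H := ih score ((a :: q') ++ [v])
        have e1 : pvFlush ((a :: q') ++ [v]) 0 false = v + pvFlush (a :: q') 0 true := by
          rw [pvFlush_append]
          simpa using pvFlush_add (a :: q') v true
        have e2 : pvFlush ((a :: q') ++ [v]) 0 true = pvFlush (a :: q') 0 false := by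
          rw [pvFlush_append]
          simp
        have e3 : ((a :: q') ++ [v]).getLast? = some v := List.getLast?_concat
        rw [e1, e2, e3] at H
        simpa using H

-- ===== VERDICT (by name: the statement is the Claim_ definition above) =====
theorem findScore_spec : Claim_equal_findScore := by
  intro nums _
  unfold Spec_findScore findScore findScore_alt
  have := pv_loop_inv nums 0 []
  simpa [pvFlush_nil] using this.symm
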